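-- pv_equiv track=rewrite | github.com/Happy-ryan/PS | 백준/Silver/30088. 공포의 면담실/공포의 면담실.py | solution
-- ===== SOURCE A (Python) =====
-- def solution(n, arr):
--     # 부서 소속원이 모두 면담 완료 = 부서원 모두 퇴사 가능
--     # 부서의 퇴근 시간이 서로 영향을 미침..
--
--     # 가설1. 면담 시간이 작은 순서로 정렬
--     times = []
--     for idx, row in enumerate(arr):
--         times.append(sum(row[1:]))
--
--     times.sort()
--
--     psum = [0] * (n + 1)
--     for i in range(1, n + 1):
--         psum[i] = psum[i - 1] + times[i - 1]
--
--     return sum(psum)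
-- ===== SOURCE B (Python) =====
-- def solution(n, arr):
--     # Single-pass weighted sum over the sorted times: each sorted time t at
--     # position i contributes to (n - i) prefix sums, so no prefix table is needed.
--     times = sorted(sum(row[1:]) for row in arr)
--     return sum((n - i) * t for i, t in enumerate(times) if i < n)
-- ===== Notes on version B (the rewrite author's own statement) =====
-- stated objective: simpler
-- what changed: Replaces the two-pass prefix-sum table (build psum[0..n], then sum it) by a single weighted-sum pass over the sorted times, weighting the i-th smallest time by n - i.
import Mathlib
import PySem

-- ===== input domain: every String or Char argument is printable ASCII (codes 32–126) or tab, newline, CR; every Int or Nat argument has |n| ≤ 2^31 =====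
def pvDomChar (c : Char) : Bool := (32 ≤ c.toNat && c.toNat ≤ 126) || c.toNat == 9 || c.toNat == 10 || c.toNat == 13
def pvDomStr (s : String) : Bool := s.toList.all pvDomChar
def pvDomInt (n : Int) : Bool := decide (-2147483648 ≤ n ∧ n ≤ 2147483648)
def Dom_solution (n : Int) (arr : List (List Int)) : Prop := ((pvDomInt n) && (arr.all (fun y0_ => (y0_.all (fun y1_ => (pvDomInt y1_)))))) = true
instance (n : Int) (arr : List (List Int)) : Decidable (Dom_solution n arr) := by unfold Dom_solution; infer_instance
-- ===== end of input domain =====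

-- B replaces A's prefix-sum table by a single weighted-sum pass over the sorted times (simpler decomposition, same asymptotic cost).

-- ===== PORT A =====
def solution (n : Int) (arr : List (List Int)) : Int :=
  -- times = []; for idx, row in enumerate(arr): times.append(sum(row[1:]))
  let times := arr.foldl (fun acc row => acc ++ [(PySem.List.slice row (some 1) none).sum]) []
  -- times.sort()
  let times := PySem.List.sorted times (fun x => x) false
  -- psum = [0] * (n + 1)
  let psum := List.replicate (n + 1).toNat (0 : Int)
  -- for i in range(1, n + 1): psum[i] = psum[i - 1] + times[i - 1]
  -- (times[i - 1] raises IndexError when out of range; Pre_solution excludes that, pyGetD default never read inside Pre_)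
  let psum := (PySem.List.pyRange 1 (n + 1) 1).foldl
    (fun ps i => ps.set i.toNat (PySem.List.pyGetD ps (i - 1) 0 + PySem.List.pyGetD times (i - 1) 0)) psum
  -- return sum(psum)
  psum.sum

-- ===== PORT B =====
def solution_alt (n : Int) (arr : List (List Int)) : Int :=
  -- times = sorted(sum(row[1:]) for row in arr)
  let times := PySem.List.sorted (arr.map (fun row => (PySem.List.slice row (some 1) none).sum)) (fun x => x) false
  -- return sum((n - i) * t for i, t in enumerate(times) if i < n)
  (PySem.List.enumerate times 0).foldl (fun acc p => if p.1 < n then acc + (n - p.1) * p.2 else acc) 0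

-- ===== PRECONDITION & SPEC =====
-- Pre_ excludes exactly the inputs where A raises IndexError (times[i-1] with i-1 ≥ len(times)), i.e. n > len(arr).
def Pre_solution (n : Int) (arr : List (List Int)) : Prop := n ≤ arr.length
instance (n : Int) (arr : List (List Int)) : Decidable (Pre_solution n arr) := by unfold Pre_solution; infer_instance
def pvWitness_solution : Int × List (List Int) := (2, [[1, 2, 3], [4, 5]])

def Spec_solution (n : Int) (arr : List (List Int)) (out : Int) : Prop := out = solution_alt n arr
instance (n : Int) (arr : List (List Int)) (out : Int) : Decidable (Spec_solution n arr out) := by unfold Spec_solution; infer_instance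

-- ===== CLAIM (what is proved, stated in full; the proofs are below) =====
def Claim_equal_solution : Prop := ∀ (n : Int) (arr : List (List Int)), Dom_solution n arr → Pre_solution n arr → Spec_solution n arr (solution n arr)

-- ===== LEMMAS AND PROOFS =====

-- weighted sum with decreasing weight: wsum w [t0,t1,...] = Σ (w-j)*tj over j with j < w
def wsum (w : Int) : List Int → Int
  | [] => 0
  | t :: ts => (if 0 < w then w * t else 0) + wsum (w - 1) ts

theorem wsum_nonpos (ts : List Int) : ∀ w : Int, w ≤ 0 → wsum w ts = 0 := by
  induction ts with
  | nil => intro w _; rfl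
  | cons t ts ih =>
    intro w hw
    simp [wsum, if_neg (by omega : ¬ 0 < w), ih (w - 1) (by omega)]

-- B's fold computes wsum (n - s) over the enumerated tail
theorem foldl_enum_eq_wsum (n : Int) (ts : List Int) : ∀ (s : Int) (acc : Int),
    (PySem.List.enumerate ts s).foldl (fun acc p => if p.1 < n then acc + (n - p.1) * p.2 else acc) acc
      = acc + wsum (n - s) ts := by
  induction ts with
  | nil => intro s acc; simp [PySem.List.enumerate_nil, wsum]
  | cons t ts ih =>
    intro s acc
    rw [PySem.List.enumerate_cons, List.foldl_cons, ih]
    simp only [wsum]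
    rw [show n - (s + 1) = n - s - 1 by ring]
    by_cases h : s < n
    · rw [if_pos h, if_pos (by omega)]
      ring
    · rw [if_neg h, if_neg (by omega)]
      ring

theorem wsum_succ (ts : List Int) : ∀ w : Int, 0 ≤ w →
    wsum (w + 1) ts = wsum w ts + (ts.take (w + 1).toNat).sum := by
  induction ts with
  | nil => intro w _; simp [wsum]
  | cons t ts ih =>
    intro w hw
    by_cases h : 0 < w
    · have hih := ih (w - 1) (by omega)
      rw [show w - 1 + 1 = w by ring] at hih
      simp only [wsum, if_pos (by omega : (0:Int) < w + 1), if_pos h]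
      rw [show w + 1 - 1 = w by ring,
          show (w + 1).toNat = w.toNat + 1 by omega, List.take_succ_cons, List.sum_cons, hih]
      ring
    · have hw0 : w = 0 := by omega
      subst hw0
      simp [wsum, wsum_nonpos ts 0 le_rfl, wsum_nonpos ts (-1) (by omega)]

-- sum of the prefix sums equals the weighted sum
theorem sum_prefix_eq_wsum (ts : List Int) (k : Nat) :
    ((List.range (k + 1)).map (fun i => (ts.take i).sum)).sum = wsum (k : Int) ts := by
  induction k with
  | zero => simp [wsum_nonpos ts 0 le_rfl]
  | succ k ih =>
    rw [List.range_succ, List.map_append, List.sum_append]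
    rw [show ((k + 1 : Nat) : Int) = (k : Int) + 1 by push_cast; ring, wsum_succ ts (k : Int) (by positivity), ih]
    simp [show ((k : Int) + 1).toNat = k + 1 by omega]

-- abbreviation for A's loop body
def stepA (ts : List Int) (ps : List Int) (i : Int) : List Int :=
  ps.set i.toNat (PySem.List.pyGetD ps (i - 1) 0 + PySem.List.pyGetD ts (i - 1) 0)

-- invariant of A's prefix-sum loop: after the iterations a+1 .. k the table holds all prefix sums
theorem loopA (ts : List Int) (k : Nat) (hk : k ≤ ts.length) : ∀ (d a : Nat), k - a = d → a ≤ k →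
    (PySem.List.pyRange ((a : Int) + 1) ((k : Int) + 1) 1).foldl (stepA ts)
      ((List.range (k + 1)).map (fun i => if i < a + 1 then (ts.take i).sum else 0))
    = (List.range (k + 1)).map (fun i => (ts.take i).sum) := by
  intro d
  induction d with
  | zero =>
    intro a hd ha
    have hak : a = k := by omega
    subst hak
    rw [PySem.List.pyRange_one_eq_nil (by omega)]
    simp only [List.foldl_nil]
    apply List.map_congr_left
    intro i hi
    rw [List.mem_range] at hi
    rw [if_pos (by omega)]
  | succ d ihd =>
    intro a hd ha
    have hak : a < k := by omega
    rw [PySem.List.pyRange_one_cons (by omega), List.foldl_cons]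
    have hstep : stepA ts ((List.range (k + 1)).map (fun i => if i < a + 1 then (ts.take i).sum else 0)) ((a : Int) + 1)
        = (List.range (k + 1)).map (fun i => if i < (a + 1) + 1 then (ts.take i).sum else 0) := by
      unfold stepA
      rw [show ((a : Int) + 1 - 1) = (a : Int) by ring,
          show ((a : Int) + 1).toNat = a + 1 by omega,
          PySem.List.pyGetD_natCast, PySem.List.pyGetD_natCast]
      apply List.ext_getElem
      · simp
      · intro i h1 h2
        simp only [List.length_set, List.length_map, List.length_range] at h1
        have hget : (((List.range (k + 1)).map (fun i => if i < a + 1 then (ts.take i).sum else 0)).getD a 0)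
            = (ts.take a).sum := by
          rw [List.getD_eq_getElem _ _ (by simp; omega)]
          simp only [List.getElem_map, List.getElem_range]
          rw [if_pos (by omega)]
        rw [List.getElem_set]
        simp only [List.getElem_map, List.getElem_range]
        by_cases hi : a + 1 = i
        · rw [if_pos hi, if_pos (by omega), hget, ← hi]
          rw [List.getD_eq_getElem _ _ (by omega), List.sum_take_succ ts a (by omega)]
        · rw [if_neg hi]
          by_cases hlt : i < a + 1
          · rw [if_pos hlt, if_pos (by omega)]
          · rw [if_neg hlt, if_neg (by omega)]
    rw [hstep, show ((a : Int) + 1 + 1) = ((a + 1 : Nat) : Int) + 1 by push_cast; ring]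
    exact ihd (a + 1) (by omega) (by omega)

-- ===== VERDICT (by name: the statement is the Claim_ definition above) =====
theorem solution_spec : Claim_equal_solution := by
  intro n arr _ hpre
  unfold Spec_solution solution solution_alt Pre_solution at *
  dsimp only
  rw [(PySem.List.foldl_append_singleton_eq_map
        (fun row => (PySem.List.slice row (some 1) none).sum) arr ([] : List Int)).trans
      (List.nil_append _)]
  set ts := PySem.List.sorted (arr.map (fun row => (PySem.List.slice row (some 1) none).sum)) (fun x => x) false with hts
  have hlen : ts.length = arr.length := by
    rw [hts, PySem.List.length_sorted, List.length_map]
  rw [foldl_enum_eq_wsum, zero_add, sub_zero]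
  by_cases hn : n < 0
  · rw [PySem.List.pyRange_one_eq_nil (by omega), show (n + 1).toNat = 0 by omega]
    simp [wsum_nonpos ts n (by omega)]
  · have hk : n = ((n.toNat : Nat) : Int) := by omega
    set k := n.toNat with hkdef
    have hkl : k ≤ ts.length := by omega
    have hrepl : List.replicate (n + 1).toNat (0 : Int)
        = (List.range (k + 1)).map (fun i => if i < 0 + 1 then (ts.take i).sum else 0) := by
      apply List.ext_getElem
      · simp only [List.length_replicate, List.length_map, List.length_range]; omega
      · intro i h1 h2
        simp only [List.length_replicate] at h1
        rw [List.getElem_replicate]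
        simp only [List.getElem_map, List.getElem_range]
        by_cases hi : i < 0 + 1
        · rw [if_pos hi]
          interval_cases i
          simp
        · rw [if_neg hi]
    rw [hrepl, hk, show (((k : Int)) + 1) = ((k : Int) + 1) from rfl]
    rw [show (PySem.List.pyRange 1 ((k : Int) + 1) 1) = PySem.List.pyRange (((0 : Nat) : Int) + 1) ((k : Int) + 1) 1 by norm_num]
    rw [show ((fun ps i => ps.set i.toNat (PySem.List.pyGetD ps (i - 1) 0 + PySem.List.pyGetD ts (i - 1) 0)) :
          List Int → Int → List Int) = stepA ts from rfl]
    rw [loopA ts k hkl (k - 0) 0 rfl (by omega)]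
    exact sum_prefix_eq_wsum ts k
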